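-- pv_equiv track=rewrite | github.com/ychalier/pseudo | pseudo/__init__.py | basic_check
-- ===== SOURCE A (Python) =====
-- VOWELS = "aeiouy"
--
-- def basic_check(word):
--     """
--     Hacky manual check of a word pronounceability.
--     """
--     if word[-1] == "b" or word[-1] == "g":
--         return False
--     consonant_counter = 0
--     for char in word:
--         if char in VOWELS:
--             consonant_counter = 0
--         else:
--             consonant_counter += 1
--         if consonant_counter >= 3:
--             return False
--     return True
-- ===== SOURCE B (Python) =====
-- VOWELS = "aeiouy"
--
-- def basic_check(word):
--     """
--     Hacky manual check of a word pronounceability.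
--     """
--     if word[-1] == "b" or word[-1] == "g":
--         return False
--     return not any(a not in VOWELS and b not in VOWELS and c not in VOWELS
--                    for a, b, c in zip(word, word[1:], word[2:]))
-- ===== Notes on version B (the rewrite author's own statement) =====
-- stated objective: idiomatic
-- what changed: Replaces the stateful running consonant counter with a stateless sliding-window scan: zip(word, word[1:], word[2:]) tests each window of three adjacent characters for being all non-vowels, with no per-character counter maintained.
import Mathlib
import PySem

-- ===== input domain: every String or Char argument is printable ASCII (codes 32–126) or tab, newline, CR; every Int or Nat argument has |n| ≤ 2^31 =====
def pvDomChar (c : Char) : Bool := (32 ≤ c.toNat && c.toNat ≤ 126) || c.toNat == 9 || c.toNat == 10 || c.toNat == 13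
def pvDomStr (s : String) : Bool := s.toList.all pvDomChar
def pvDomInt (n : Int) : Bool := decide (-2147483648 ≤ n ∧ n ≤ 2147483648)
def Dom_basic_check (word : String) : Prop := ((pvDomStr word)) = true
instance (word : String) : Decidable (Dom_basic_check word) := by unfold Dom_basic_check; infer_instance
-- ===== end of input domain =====

-- B replaces A's running consonant counter with a stateless sliding-window scan over
-- all triples of adjacent characters (idiomatic; same return value wherever A returns).

-- ===== PORT A =====
-- A's for-loop; the state is consonant_counter
def basic_check_loop : List Char → Int → Bool
  | [], _ => true
  | c :: rest, k =>
    let k' : Int := if "aeiouy".toList.contains c then 0 else k + 1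
    if k' ≥ 3 then false else basic_check_loop rest k'

def basic_check (word : String) : Bool :=
  match PySem.Str.pyGet? word (-1) with
  | none => true          -- word[-1] raises IndexError in Python (empty word); excluded by Pre_
  | some last =>
    if last = 'b' || last = 'g' then false
    else basic_check_loop word.toList 0

-- ===== PORT B =====
-- `c not in VOWELS`
def pvConsB (c : Char) : Bool := !("aeiouy".toList.contains c)

-- any(a not in VOWELS and b not in VOWELS and c not in VOWELS for a, b, c in zip(word, word[1:], word[2:]))
def pvTripleAny (l : List Char) : Bool :=
  ((l.zip (l.drop 1)).zip (l.drop 2)).any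
    (fun p => pvConsB p.1.1 && pvConsB p.1.2 && pvConsB p.2)

def basic_check_alt (word : String) : Bool :=
  match PySem.Str.pyGet? word (-1) with
  | none => true          -- word[-1] raises IndexError in Python (empty word); excluded by Pre_
  | some last =>
    if last = 'b' || last = 'g' then false
    else !(pvTripleAny word.toList)

-- ===== PRECONDITION & SPEC =====
-- Pre_ excludes only the empty word, on which Python A (and B) raise IndexError at word[-1].
def Pre_basic_check (word : String) : Prop := word ≠ ""
instance (word : String) : Decidable (Pre_basic_check word) := by unfold Pre_basic_check; infer_instance
def pvWitness_basic_check : String := "strength"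

def Spec_basic_check (word : String) (out : Bool) : Prop := out = basic_check_alt word
instance (word : String) (out : Bool) : Decidable (Spec_basic_check word out) := by unfold Spec_basic_check; infer_instance

-- ===== CLAIM (what is proved, stated in full; the proofs are below) =====
def Claim_equal_basic_check : Prop := ∀ (word : String), Dom_basic_check word → Pre_basic_check word → Spec_basic_check word (basic_check word)

-- ===== LEMMAS AND PROOFS =====

-- "there is a run of three adjacent consonants somewhere in l"
def pvHasRun : List Char → Bool
  | a :: rest@(b :: c :: _) => (pvConsB a && pvConsB b && pvConsB c) || pvHasRun rest
  | _ => false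

-- "the first n characters exist and are all consonants"
def pvLead : Nat → List Char → Bool
  | 0, _ => true
  | _ + 1, [] => false
  | n + 1, c :: r => pvConsB c && pvLead n r

theorem pvTripleAny_eq_hasRun (l : List Char) : pvTripleAny l = pvHasRun l := by
  induction l with
  | nil => simp [pvTripleAny, pvHasRun]
  | cons a rest ih =>
    match rest with
    | [] => simp [pvTripleAny, pvHasRun]
    | [b] => simp [pvTripleAny, pvHasRun]
    | b :: c :: r =>
      simp only [pvTripleAny, pvHasRun, List.drop, List.zip, List.zipWith, List.any_cons] at *
      rw [← ih]

theorem pvLead_mono (l : List Char) (m n : Nat) (hn : n ≤ m) (h : pvLead m l = true) :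
    pvLead n l = true := by
  induction l generalizing m n with
  | nil =>
    cases n with
    | zero => rfl
    | succ n => cases m with
      | zero => omega
      | succ m => simp [pvLead] at h
  | cons c r ih =>
    cases n with
    | zero => rfl
    | succ n =>
      cases m with
      | zero => omega
      | succ m =>
        simp only [pvLead, Bool.and_eq_true] at h ⊢
        exact ⟨h.1, ih m n (by omega) h.2⟩

theorem pvLead3_hasRun (l : List Char) (h : pvLead 3 l = true) : pvHasRun l = true := by
  match l with
  | [] | [_] | [_, _] => simp [pvLead] at h
  | a :: b :: c :: r =>
    simp only [pvLead, Bool.and_eq_true] at h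
    simp [pvHasRun, h.1, h.2.1, h.2.2.1]

theorem pvHasRun_cons (c : Char) (rest : List Char) :
    pvHasRun (c :: rest) = (pvLead 3 (c :: rest) || pvHasRun rest) := by
  match rest with
  | [] => simp [pvHasRun, pvLead]
  | [_] => simp [pvHasRun, pvLead]
  | a :: b :: r => simp [pvHasRun, pvLead, Bool.and_assoc]

theorem basic_check_loop_eq (l : List Char) (k : Int) (hk : k = 0 ∨ k = 1 ∨ k = 2) :
    basic_check_loop l k = !(pvLead (3 - k).toNat l || pvHasRun l) := by
  induction l generalizing k with
  | nil =>
    rcases hk with rfl | rfl | rfl <;> simp [basic_check_loop, pvLead, pvHasRun]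
  | cons c rest ih =>
    by_cases hv : "aeiouy".toList.contains c = true
    · have hcons : pvConsB c = false := by simp only [pvConsB]; rw [hv]; rfl
      have h1 : basic_check_loop (c :: rest) k = basic_check_loop rest 0 := by
        simp only [basic_check_loop]; rw [hv]; simp
      have h2 : pvLead (3 - k).toNat (c :: rest) = false := by
        rcases hk with rfl | rfl | rfl <;> simp [pvLead, hcons]
      rw [h1, ih 0 (Or.inl rfl), pvHasRun_cons, h2]
      have h3 : pvLead 3 (c :: rest) = false := by simp [pvLead, hcons]
      rw [h3]
      rcases h4 : pvLead 3 rest with _ | _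
      · simp [h4]
      · simp [h4, pvLead3_hasRun rest h4]
    · rw [Bool.not_eq_true] at hv
      have hcons : pvConsB c = true := by simp only [pvConsB]; rw [hv]; rfl
      rw [pvHasRun_cons]
      have hlead3 : pvLead 3 (c :: rest) = pvLead 2 rest := by simp [pvLead, hcons]
      rcases hk with rfl | rfl | rfl
      · have h1 : basic_check_loop (c :: rest) 0 = basic_check_loop rest 1 := by
          simp only [basic_check_loop]; rw [hv]; simp
        rw [h1, ih 1 (Or.inr (Or.inl rfl)), hlead3]
        have e0 : ((3 : Int) - 0).toNat = 3 := by decide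
        have e1 : ((3 : Int) - 1).toNat = 2 := by decide
        rw [e0, e1, show pvLead 3 (c :: rest) = pvLead 2 rest from by simp [pvLead, hcons]]
        rcases h2 : pvLead 2 rest with _ | _ <;> simp
      · have h1 : basic_check_loop (c :: rest) 1 = basic_check_loop rest 2 := by
          simp only [basic_check_loop]; rw [hv]; simp
        rw [h1, ih 2 (Or.inr (Or.inr rfl)), hlead3]
        have e1 : ((3 : Int) - 1).toNat = 2 := by decide
        have e2 : ((3 : Int) - 2).toNat = 1 := by decide
        rw [e1, e2, show pvLead 2 (c :: rest) = pvLead 1 rest from by simp [pvLead, hcons]]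
        rcases h2 : pvLead 2 rest with _ | _
        · simp
        · have h3 : pvLead 1 rest = true := pvLead_mono rest 2 1 (by omega) h2
          simp [h3]
      · have h1 : basic_check_loop (c :: rest) 2 = false := by
          simp only [basic_check_loop]; rw [hv]; simp
        rw [h1]
        have e2 : ((3 : Int) - 2).toNat = 1 := by decide
        rw [e2]
        simp [pvLead, hcons]

-- ===== VERDICT (by name: the statement is the Claim_ definition above) =====
theorem basic_check_spec : Claim_equal_basic_check := by
  intro word _ _
  unfold Spec_basic_check basic_check basic_check_alt
  cases h : PySem.Str.pyGet? word (-1) with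
  | none => rfl
  | some last =>
    show (if (last = 'b' || last = 'g') = true then false else basic_check_loop word.toList 0)
       = (if (last = 'b' || last = 'g') = true then false else !pvTripleAny word.toList)
    by_cases hb : (last = 'b' || last = 'g') = true
    · rw [if_pos hb, if_pos hb]
    · rw [if_neg hb, if_neg hb, pvTripleAny_eq_hasRun,
        basic_check_loop_eq word.toList 0 (Or.inl rfl),
        show ((3 : Int) - 0).toNat = 3 from rfl]
      cases h4 : pvLead 3 word.toList with
      | false => rw [Bool.false_or]
      | true => rw [pvLead3_hasRun _ h4, Bool.true_or]
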